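-- pv_equiv track=rewrite | github.com/WhisperComments/NovelSnip | novel_injector.py | insert_snippets_into_code
-- ===== SOURCE A (Python) =====
-- from typing import List
--
-- def insert_snippets_into_code(code_lines:List[str], snippets_blocks:List[str], positions:List[int]) -> List[str]:
--     # positions are insertion indices BEFORE which to insert snippet block
--     out = []
--     last = 0
--     for pos, block in zip(positions, snippets_blocks):
--         # clamp
--         p = max(last, min(len(code_lines), pos))
--         out.extend(code_lines[last:p])
--         out.append(block.rstrip("\n"))  # block may contain multiple lines; keep as single element for clarity
--         last = p
--     out.extend(code_lines[last:])
--     # flatten: because we inserted block strings among lines, now we need to split them into lines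
--     final = []
--     for item in out:
--         if "\n" in item:
--             final.extend(item.splitlines())
--         else:
--             final.append(item)
--     return final
-- ===== SOURCE B (Python) =====
-- from typing import List
--
-- def insert_snippets_into_code(code_lines: List[str], snippets_blocks: List[str], positions: List[int]) -> List[str]:
--     # Bucket each snippet's lines under its effective (monotonically clamped)
--     # insertion index, then emit the result by a single sweep over line indices.
--     n = len(code_lines)
--
--     def as_lines(s: str) -> List[str]:
--         return s.splitlines() if "\n" in s else [s]
--
--     buckets = {}
--     eff = 0
--     for pos, block in zip(positions, snippets_blocks):
--         eff = max(eff, min(n, pos))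
--         buckets.setdefault(eff, []).extend(as_lines(block.rstrip("\n")))
--
--     final = []
--     for k in range(n + 1):
--         final.extend(buckets.get(k, []))
--         if k < n:
--             final.extend(as_lines(code_lines[k]))
--     return final
-- ===== Notes on version B (the rewrite author's own statement) =====
-- stated objective: alternative
-- what changed: B replaces A's sequential slice-merge plus flatten with a bucket algorithm: it groups each snippet's lines in a dict keyed by the effective clamped insertion index, then produces the output by one sweep over line indices 0..n, emitting each index's bucket before the code line.
import Mathlib
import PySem

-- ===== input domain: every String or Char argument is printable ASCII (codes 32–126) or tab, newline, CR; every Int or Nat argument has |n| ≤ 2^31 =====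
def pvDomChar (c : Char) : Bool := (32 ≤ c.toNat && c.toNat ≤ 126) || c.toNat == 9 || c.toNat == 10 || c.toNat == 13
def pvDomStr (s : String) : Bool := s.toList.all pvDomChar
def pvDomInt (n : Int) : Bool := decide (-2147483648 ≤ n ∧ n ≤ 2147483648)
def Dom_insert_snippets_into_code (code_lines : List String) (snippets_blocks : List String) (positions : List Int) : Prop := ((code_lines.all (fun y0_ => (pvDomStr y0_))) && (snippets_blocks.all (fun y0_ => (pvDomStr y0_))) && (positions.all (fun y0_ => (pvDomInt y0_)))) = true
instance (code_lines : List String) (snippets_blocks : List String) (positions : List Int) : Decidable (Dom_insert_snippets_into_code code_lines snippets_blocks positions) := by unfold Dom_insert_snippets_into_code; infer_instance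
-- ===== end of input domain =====

-- B replaces A's sequential slice-merge + flatten pass with a bucket algorithm:
-- snippet lines are grouped in a dict keyed by effective insertion index, then the
-- output is produced by one sweep over line indices; objective: alternative algorithm.

-- shared helper: s.rstrip("\n") — hand port (PySem has no rstrip-with-chars); exact:
-- drops exactly the trailing '\n' characters.
def pvRstripNl (s : String) : String :=
  String.ofList ((s.toList.reverse.dropWhile (fun c => c == '\n')).reverse)

-- ===== PORT A =====
def insert_snippets_into_code (code_lines : List String) (snippets_blocks : List String) (positions : List Int) : List String :=
  let n : Int := code_lines.length
  -- out = []; last = 0; for pos, block in zip(positions, snippets_blocks): ...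
  let st := (positions.zip snippets_blocks).foldl
    (fun (st : List String × Int) pb =>
      let p := max st.2 (min n pb.1)
      (st.1 ++ PySem.List.slice code_lines (some st.2) (some p) ++ [pvRstripNl pb.2], p))
    ([], 0)
  let out := st.1 ++ PySem.List.slice code_lines (some st.2) none
  -- final = []; for item in out: split if "\n" in item
  out.foldl
    (fun final item =>
      if PySem.Str.isIn "\n" item then final ++ PySem.Str.splitlines item
      else final ++ [item])
    []

-- ===== PORT B =====
-- as_lines(s): s.splitlines() if "\n" in s else [s]
def pvLines (item : String) : List String :=
  if PySem.Str.isIn "\n" item then PySem.Str.splitlines item else [item]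

def insert_snippets_into_code_alt (code_lines : List String) (snippets_blocks : List String) (positions : List Int) : List String :=
  let n : Int := code_lines.length
  -- buckets = {}; eff = 0; for pos, block in zip(...): buckets.setdefault(eff, []).extend(as_lines(block.rstrip("\n")))
  let st := (positions.zip snippets_blocks).foldl
    (fun (st : PySem.Dict Int (List String) × Int) pb =>
      let e := max st.2 (min n pb.1)
      (st.1.modify e [] (fun cur => cur ++ pvLines (pvRstripNl pb.2)), e))
    (PySem.Dict.empty, 0)
  -- final = []; for k in range(n + 1): final.extend(buckets.get(k, [])); if k < n: final.extend(as_lines(code_lines[k]))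
  (PySem.List.pyRange 0 (n + 1) 1).foldl
    (fun final k =>
      final ++ st.1.getD k []
        ++ (if k < n then pvLines (PySem.List.pyGetD code_lines k "") else []))
    []

-- ===== PRECONDITION & SPEC =====
def Spec_insert_snippets_into_code (code_lines : List String) (snippets_blocks : List String) (positions : List Int) (out : List String) : Prop := out = insert_snippets_into_code_alt code_lines snippets_blocks positions
instance (code_lines : List String) (snippets_blocks : List String) (positions : List Int) (out : List String) : Decidable (Spec_insert_snippets_into_code code_lines snippets_blocks positions out) := by unfold Spec_insert_snippets_into_code; infer_instance

-- ===== CLAIM (what is proved, stated in full; the proofs are below) =====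
def Claim_equal_insert_snippets_into_code : Prop := ∀ (code_lines : List String) (snippets_blocks : List String) (positions : List Int), Dom_insert_snippets_into_code code_lines snippets_blocks positions → Spec_insert_snippets_into_code code_lines snippets_blocks positions (insert_snippets_into_code code_lines snippets_blocks positions)

-- ===== LEMMAS AND PROOFS =====

-- A's 'out' list, written as a structural recursion over the zipped pairs
def aOut (code_lines : List String) (n : Int) : List (Int × String) → Int → List String
  | [], last => PySem.List.slice code_lines (some last) none
  | (pos, b) :: rest, last =>
    let p := max last (min n pos)
    PySem.List.slice code_lines (some last) (some p) ++ [pvRstripNl b] ++ aOut code_lines n rest p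

-- the flattened snippet lines whose effective insertion index is k
def blocksAt (n : Int) : List (Int × String) → Int → Int → List String
  | [], _, _ => []
  | (pos, b) :: rest, e, k =>
    let p := max e (min n pos)
    (if k = p then pvLines (pvRstripNl b) else []) ++ blocksAt n rest p k

-- A's first fold builds acc ++ aOut (once the tail slice is appended)
theorem aFold_eq (code_lines : List String) (n : Int) :
    ∀ (pairs : List (Int × String)) (acc : List String) (last : Int),
      (let st := pairs.foldl
        (fun (st : List String × Int) pb =>
          let p := max st.2 (min n pb.1)
          (st.1 ++ PySem.List.slice code_lines (some st.2) (some p) ++ [pvRstripNl pb.2], p))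
        (acc, last)
       st.1 ++ PySem.List.slice code_lines (some st.2) none)
      = acc ++ aOut code_lines n pairs last := by
  intro pairs
  induction pairs with
  | nil => intro acc last; simp [aOut]
  | cons pb rest ih =>
    intro acc last
    obtain ⟨pos, b⟩ := pb
    simp only [List.foldl_cons]
    rw [ih]
    simp [aOut, List.append_assoc]

-- A's flatten fold is acc ++ flatMap pvLines
theorem flattenFold_eq (out : List String) :
    ∀ acc : List String,
      out.foldl
        (fun final item =>
          if PySem.Str.isIn "\n" item then final ++ PySem.Str.splitlines item
          else final ++ [item]) acc
      = acc ++ out.flatMap pvLines := by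
  induction out with
  | nil => intro acc; simp
  | cons x xs ih =>
    intro acc
    simp only [List.foldl_cons, List.flatMap_cons]
    rw [ih]
    unfold pvLines
    split <;> simp [List.append_assoc]

-- B's dict fold: every lookup of the final dict is the initial lookup ++ blocksAt
theorem dictFold_getD (n : Int) :
    ∀ (pairs : List (Int × String)) (d : PySem.Dict Int (List String)) (e k : Int),
      ((pairs.foldl
        (fun (st : PySem.Dict Int (List String) × Int) pb =>
          (st.1.modify (max st.2 (min n pb.1)) []
            (fun cur => cur ++ pvLines (pvRstripNl pb.2)),
           max st.2 (min n pb.1)))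
        (d, e)).1).getD k []
      = d.getD k [] ++ blocksAt n pairs e k := by
  intro pairs
  induction pairs with
  | nil => intro d e k; simp [blocksAt]
  | cons pb rest ih =>
    intro d e k
    obtain ⟨pos, b⟩ := pb
    simp only [List.foldl_cons]
    rw [ih]
    simp only [blocksAt]
    by_cases hk : k = max e (min n pos)
    · subst hk
      rw [PySem.Dict.getD_modify_self]
      simp [List.append_assoc]
    · rw [PySem.Dict.getD_modify_of_ne _ _ _ hk]
      simp [hk]

-- blocks inserted from effective index e never land below e
theorem blocksAt_eq_nil_of_lt (n : Int) :
    ∀ (pairs : List (Int × String)) (e k : Int), k < e → blocksAt n pairs e k = [] := by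
  intro pairs
  induction pairs with
  | nil => intro e k _; simp [blocksAt]
  | cons pb rest ih =>
    intro e k hk
    obtain ⟨pos, b⟩ := pb
    simp only [blocksAt]
    rw [if_neg (by omega), ih _ _ (by omega)]
    simp

-- the code-line part of the sweep over [a, b) is the slice code[a:b], flattened
theorem sweep_lines_seg (code_lines : List String) (a b : Int)
    (ha : 0 ≤ a) (hab : a ≤ b) (hb : b ≤ (code_lines.length : Int)) :
    (PySem.List.pyRange a b 1).flatMap
        (fun k => if k < (code_lines.length : Int) then pvLines (PySem.List.pyGetD code_lines k "") else [])
      = ((code_lines.drop a.toNat).take (b.toNat - a.toNat)).flatMap pvLines := by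
  have h1 : (PySem.List.pyRange a b 1).flatMap
        (fun k => if k < (code_lines.length : Int) then pvLines (PySem.List.pyGetD code_lines k "") else [])
      = (PySem.List.pyRange a b 1).flatMap
        (fun k => pvLines (PySem.List.pyGetD code_lines k "")) := by
    apply List.flatMap_congr
    intro x hx
    rw [PySem.List.mem_pyRange_one] at hx
    rw [if_pos (by omega)]
  rw [h1]
  have h2 : (PySem.List.pyRange a b 1).flatMap (fun k => pvLines (PySem.List.pyGetD code_lines k ""))
      = ((PySem.List.pyRange a b 1).map (fun k => PySem.List.pyGetD code_lines k "")).flatMap pvLines := by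
    rw [List.flatMap_map]
  rw [h2]
  have h3 : (PySem.List.pyRange a b 1).map (fun k => PySem.List.pyGetD code_lines k "")
      = (code_lines.drop a.toNat).take (b.toNat - a.toNat) := by
    have hmap := PySem.List.map_pyGetD_pyRange code_lines "" ha
    have hlenx : PySem.List.len code_lines = (code_lines.length : Int) := by simp
    rw [hlenx, PySem.List.pyRange_one_append a b (code_lines.length : Int) hab hb,
      List.map_append] at hmap
    have hlen : ((PySem.List.pyRange a b 1).map (fun k => PySem.List.pyGetD code_lines k "")).length
        = b.toNat - a.toNat := by
      simp [PySem.List.length_pyRange_one]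
      omega
    calc (PySem.List.pyRange a b 1).map (fun k => PySem.List.pyGetD code_lines k "")
        = (((PySem.List.pyRange a b 1).map (fun k => PySem.List.pyGetD code_lines k ""))
            ++ ((PySem.List.pyRange b (code_lines.length : Int) 1).map (fun k => PySem.List.pyGetD code_lines k ""))).take (b.toNat - a.toNat) :=
          (List.take_left' hlen).symm
      _ = (code_lines.drop a.toNat).take (b.toNat - a.toNat) := by rw [hmap]
  rw [h3]

-- the heart: A's out flattened = sweep with the blocksAt buckets, from any 0 ≤ last ≤ n
theorem aOut_flat_eq_sweep (code_lines : List String) :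
    ∀ (pairs : List (Int × String)) (last : Int),
      0 ≤ last → last ≤ (code_lines.length : Int) →
      (aOut code_lines (code_lines.length : Int) pairs last).flatMap pvLines
      = (PySem.List.pyRange last ((code_lines.length : Int) + 1) 1).flatMap
          (fun k => blocksAt (code_lines.length : Int) pairs last k
            ++ (if k < (code_lines.length : Int) then pvLines (PySem.List.pyGetD code_lines k "") else [])) := by
  intro pairs
  induction pairs with
  | nil =>
    intro last h0 hn
    simp only [aOut, blocksAt, List.nil_append]
    rw [PySem.List.slice_from code_lines h0]
    have hsplit := PySem.List.pyRange_one_append last (code_lines.length : Int)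
      ((code_lines.length : Int) + 1) hn (by omega)
    rw [hsplit, List.flatMap_append]
    have hlastseg : (PySem.List.pyRange (code_lines.length : Int) ((code_lines.length : Int) + 1) 1).flatMap
        (fun k => if k < (code_lines.length : Int) then pvLines (PySem.List.pyGetD code_lines k "") else []) = [] := by
      rw [PySem.List.pyRange_one_singleton]
      simp
    rw [hlastseg, List.append_nil]
    rw [sweep_lines_seg code_lines last (code_lines.length : Int) h0 hn (le_refl _)]
    congr 1
    exact (List.take_of_length_le (by simp)).symm
  | cons pb rest ih =>
    intro last h0 hn
    obtain ⟨pos, b⟩ := pb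
    set n : Int := (code_lines.length : Int) with hn_def
    set p : Int := max last (min n pos) with hp_def
    have hlp : last ≤ p := by omega
    have hpn : p ≤ n := by omega
    have h0p : 0 ≤ p := by omega
    -- first segment: k < p, so the block part is empty
    have hseg1 : (PySem.List.pyRange last p 1).flatMap
        (fun k => blocksAt n ((pos, b) :: rest) last k
          ++ (if k < n then pvLines (PySem.List.pyGetD code_lines k "") else []))
        = (PySem.List.pyRange last p 1).flatMap
          (fun k => if k < n then pvLines (PySem.List.pyGetD code_lines k "") else []) := by
      apply List.flatMap_congr
      intro k hk
      rw [PySem.List.mem_pyRange_one] at hk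
      simp only [blocksAt, ← hp_def]
      rw [if_neg (by omega), blocksAt_eq_nil_of_lt n rest p k (by omega)]
      simp
    -- at k = p the head block is emitted first
    have hsegp : blocksAt n ((pos, b) :: rest) last p = pvLines (pvRstripNl b) ++ blocksAt n rest p p := by
      simp only [blocksAt, ← hp_def]
      simp
    -- beyond p the head block contributes nothing
    have hseg2 : (PySem.List.pyRange (p + 1) (n + 1) 1).flatMap
        (fun k => blocksAt n ((pos, b) :: rest) last k
          ++ (if k < n then pvLines (PySem.List.pyGetD code_lines k "") else []))
        = (PySem.List.pyRange (p + 1) (n + 1) 1).flatMap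
          (fun k => blocksAt n rest p k
            ++ (if k < n then pvLines (PySem.List.pyGetD code_lines k "") else [])) := by
      apply List.flatMap_congr
      intro k hk
      rw [PySem.List.mem_pyRange_one] at hk
      simp only [blocksAt, ← hp_def]
      rw [if_neg (by omega)]
      simp
    have hpeel : ∀ (g : Int → List String),
        (PySem.List.pyRange p (n + 1) 1).flatMap g
          = g p ++ (PySem.List.pyRange (p + 1) (n + 1) 1).flatMap g := by
      intro g
      rw [PySem.List.pyRange_one_cons (by omega : p < n + 1), List.flatMap_cons]
    calc (aOut code_lines n ((pos, b) :: rest) last).flatMap pvLines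
        = ((code_lines.drop last.toNat).take (p.toNat - last.toNat)).flatMap pvLines
            ++ (pvLines (pvRstripNl b)
            ++ (PySem.List.pyRange p (n + 1) 1).flatMap
                (fun k => blocksAt n rest p k
                  ++ (if k < n then pvLines (PySem.List.pyGetD code_lines k "") else []))) := by
          simp only [aOut, ← hp_def, List.flatMap_append]
          rw [ih p h0p hpn, PySem.List.slice_toNat code_lines h0 h0p]
          simp [List.append_assoc]
      _ = (PySem.List.pyRange last (n + 1) 1).flatMap
            (fun k => blocksAt n ((pos, b) :: rest) last k
              ++ (if k < n then pvLines (PySem.List.pyGetD code_lines k "") else [])) := by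
          conv_rhs => rw [PySem.List.pyRange_one_append last p (n + 1) hlp (by omega)]
          rw [List.flatMap_append, hseg1, sweep_lines_seg code_lines last p h0 hlp hpn,
            hpeel, hpeel]
          rw [hseg2]
          simp only [hsegp]
          simp [List.append_assoc]

-- ===== VERDICT (by name: the statement is the Claim_ definition above) =====
theorem insert_snippets_into_code_spec : Claim_equal_insert_snippets_into_code := by
  unfold Claim_equal_insert_snippets_into_code
  intro code_lines snippets_blocks positions _
  unfold Spec_insert_snippets_into_code
  unfold insert_snippets_into_code insert_snippets_into_code_alt
  simp only []
  rw [flattenFold_eq]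
  rw [aFold_eq code_lines (code_lines.length : Int) (positions.zip snippets_blocks) [] 0]
  simp only [List.nil_append]
  -- B's sweep fold is a flatMap over the range
  simp only [List.append_assoc]
  rw [PySem.List.foldl_append_eq_flatMap]
  -- replace the dict lookups by blocksAt
  have hd : ∀ k, ((((positions.zip snippets_blocks)).foldl
      (fun (st : PySem.Dict Int (List String) × Int) pb =>
        (st.1.modify (max st.2 (min (code_lines.length : Int) pb.1)) []
          (fun cur => cur ++ pvLines (pvRstripNl pb.2)),
         max st.2 (min (code_lines.length : Int) pb.1)))
      (PySem.Dict.empty, 0)).1).getD k []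
      = blocksAt (code_lines.length : Int) (positions.zip snippets_blocks) 0 k := by
    intro k
    rw [dictFold_getD (code_lines.length : Int) (positions.zip snippets_blocks) PySem.Dict.empty 0 k]
    simp [PySem.Dict.getD, PySem.Dict.get?, PySem.Dict.empty]
  rw [aOut_flat_eq_sweep code_lines (positions.zip snippets_blocks) 0 le_rfl (by positivity)]
  apply List.flatMap_congr
  intro k _
  rw [hd k]
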